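-- pv_equiv track=rewrite | github.com/Vaunorage/ClearBias | test10.py | calculate_discrimination_space
-- ===== SOURCE A (Python) =====
-- from typing import Dict, Set, List, Tuple
-- from typing import Dict, Set, List
-- import math
--
-- def calculate_discrimination_space(
--         T: Dict[str, Set],
--         X: Dict[str, Set]
-- ) -> int:
--     """
--     Calculate the size considering pairs of groups
--     """
--     total = 0
--
--     # For each possible subset selection of attributes
--     for i in range(1, len(T) + 1):
--         for j in range(1, len(X) + 1):
--             # Number of ways to select attributes
--             ct = math.comb(len(T), i)
--             cx = math.comb(len(X), j)
--
--             # For each selection, calculate total number of possible value combinations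
--             num_values_t = math.prod([len(val_set) for val_set in list(T.values())[:i]])
--             num_values_x = math.prod([len(val_set) for val_set in list(X.values())[:j]])
--
--             # Total number of value combinations for this selection
--             total_combinations = num_values_t * num_values_x
--
--             # Number of possible pairs of these combinations
--             num_pairs = math.comb(total_combinations, 2)
--
--             # Add to total
--             total += ct * cx * num_pairs
--
--     return total
-- ===== SOURCE B (Python) =====
-- import math
--
-- def calculate_discrimination_space(T, X):
--     """Same value as A, but value-combination counts come from running prefix
--     products instead of recomputing math.prod over a slice at every (i, j)."""
--     n = len(T)
--     m = len(X)
--     # Precompute once per j: (C(m, j), product of the first j X value-set sizes)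
--     xfacts = []
--     p = 1
--     j = 0
--     for vs in X.values():
--         p *= len(vs)
--         j += 1
--         xfacts.append((math.comb(m, j), p))
--     total = 0
--     a = 1
--     i = 0
--     for vs in T.values():
--         a *= len(vs)
--         i += 1
--         ct = math.comb(n, i)
--         for cx, b in xfacts:
--             total += ct * cx * math.comb(a * b, 2)
--     return total
-- ===== Notes on version B (the rewrite author's own statement) =====
-- stated objective: faster
-- what changed: B precomputes a per-j list of (C(m,j), prefix product of X value-set sizes) once and maintains a running prefix product over T, so each (i,j) step is O(1) instead of rebuilding two slices and calling math.prod over them.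
import Mathlib
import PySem

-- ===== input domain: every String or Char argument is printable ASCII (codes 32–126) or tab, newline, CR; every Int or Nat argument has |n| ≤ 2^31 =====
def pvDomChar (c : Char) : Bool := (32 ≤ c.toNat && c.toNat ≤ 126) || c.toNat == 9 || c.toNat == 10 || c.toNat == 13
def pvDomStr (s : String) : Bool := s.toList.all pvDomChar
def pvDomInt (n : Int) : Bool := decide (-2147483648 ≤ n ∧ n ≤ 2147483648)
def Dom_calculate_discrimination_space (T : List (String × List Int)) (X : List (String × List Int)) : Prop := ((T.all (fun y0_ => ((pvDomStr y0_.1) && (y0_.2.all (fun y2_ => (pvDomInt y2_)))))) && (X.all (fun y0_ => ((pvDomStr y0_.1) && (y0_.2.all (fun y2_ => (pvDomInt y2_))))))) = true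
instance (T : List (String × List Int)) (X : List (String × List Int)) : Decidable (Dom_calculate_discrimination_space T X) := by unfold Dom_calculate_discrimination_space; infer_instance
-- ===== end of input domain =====

-- B replaces the per-(i,j) slice-and-math.prod recomputation by a precomputed per-j
-- list of (C(m,j), prefix product) and a running prefix product over T (measured faster).

-- ===== PORT A =====
-- math.comb n k (both Pythons call it with 0 ≤ k ≤ n or k = 2; exact there)
def pvComb (n k : Nat) : Int := (n.choose k : Nat)

def calculate_discrimination_space (T : List (String × List Int)) (X : List (String × List Int)) : Int :=
  (PySem.List.pyRange 1 ((T.length : Int) + 1) 1).foldl (fun total i =>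
    (PySem.List.pyRange 1 ((X.length : Int) + 1) 1).foldl (fun total j =>
      let ct := pvComb T.length i.toNat
      let cx := pvComb X.length j.toNat
      let num_values_t := ((PySem.List.slice (T.map (fun p => p.2)) none (some i)).map (fun s => (s.length : Int))).prod
      let num_values_x := ((PySem.List.slice (X.map (fun p => p.2)) none (some j)).map (fun s => (s.length : Int))).prod
      let total_combinations := num_values_t * num_values_x
      -- math.comb(total_combinations, 2); total_combinations is a product of lengths, hence ≥ 0, so .toNat is exact
      let num_pairs := pvComb total_combinations.toNat 2
      total + ct * cx * num_pairs) total) 0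

-- ===== PORT B =====
-- the 'for vs in X.values(): p *= len(vs); j += 1; xfacts.append((comb(m,j), p))' loop
def pvXFacts (m : Nat) : List (List Int) → Int → Nat → List (Int × Int)
  | [], _, _ => []
  | vs :: rest, p, j =>
      let p' := p * (vs.length : Int)
      (pvComb m (j + 1), p') :: pvXFacts m rest p' (j + 1)

-- the outer 'for vs in T.values(): …' loop with running product a and index i
def pvOuter (n : Nat) (xfacts : List (Int × Int)) : List (List Int) → Int → Nat → Int → Int
  | [], _, _, total => total
  | vs :: rest, a, i, total =>
      let a' := a * (vs.length : Int)
      let ct := pvComb n (i + 1)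
      let total' := xfacts.foldl (fun t cb => t + ct * cb.1 * pvComb (a' * cb.2).toNat 2) total
      pvOuter n xfacts rest a' (i + 1) total'

def calculate_discrimination_space_alt (T : List (String × List Int)) (X : List (String × List Int)) : Int :=
  pvOuter T.length (pvXFacts X.length (X.map (fun p => p.2)) 1 0) (T.map (fun p => p.2)) 1 0 0

-- ===== PRECONDITION & SPEC =====
def Spec_calculate_discrimination_space (T : List (String × List Int)) (X : List (String × List Int)) (out : Int) : Prop := out = calculate_discrimination_space_alt T X
instance (T : List (String × List Int)) (X : List (String × List Int)) (out : Int) : Decidable (Spec_calculate_discrimination_space T X out) := by unfold Spec_calculate_discrimination_space; infer_instance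

-- ===== CLAIM (what is proved, stated in full; the proofs are below) =====
def Claim_equal_calculate_discrimination_space : Prop := ∀ (T : List (String × List Int)) (X : List (String × List Int)), Dom_calculate_discrimination_space T X → Spec_calculate_discrimination_space T X (calculate_discrimination_space T X)

-- ===== LEMMAS AND PROOFS =====

-- product of the sizes of the first k value lists
def pvP (vals : List (List Int)) (k : Nat) : Int := ((vals.take k).map (fun s => (s.length : Int))).prod

-- one row of the sum, as B computes it from a precomputed xfacts list
def pvRow (xf : List (Int × Int)) (ct a' : Int) : Int :=
  (xf.map (fun cb => ct * cb.1 * pvComb (a' * cb.2).toNat 2)).sum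

theorem pvP_cons_succ (v : List Int) (vals : List (List Int)) (k : Nat) :
    pvP (v :: vals) (k + 1) = (v.length : Int) * pvP vals k := by
  simp [pvP]

theorem pvXFacts_eq (m : Nat) (xs : List (List Int)) (p : Int) (j : Nat) :
    pvXFacts m xs p j =
      (List.range xs.length).map (fun k => (pvComb m (j + k + 1), p * pvP xs (k + 1))) := by
  induction xs generalizing p j with
  | nil => simp [pvXFacts]
  | cons v rest ih =>
      simp only [pvXFacts, ih, List.length_cons, List.range_succ_eq_map, List.map_cons,
        List.map_map]
      congr 1
      · simp [pvP]
      · apply List.map_congr_left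
        intro k _
        simp only [Function.comp, Nat.succ_eq_add_one, pvP_cons_succ]
        have e1 : j + 1 + k + 1 = j + (k + 1) + 1 := by omega
        rw [e1, ← mul_assoc]

theorem pvOuter_eq (n : Nat) (xf : List (Int × Int)) (ts : List (List Int)) (a : Int)
    (i : Nat) (total : Int) :
    pvOuter n xf ts a i total =
      total + ((List.range ts.length).map
        (fun k => pvRow xf (pvComb n (i + k + 1)) (a * pvP ts (k + 1)))).sum := by
  induction ts generalizing a i total with
  | nil => simp [pvOuter]
  | cons v rest ih =>
      simp only [pvOuter, ih, PySem.List.foldl_add, List.length_cons,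
        List.range_succ_eq_map, List.map_cons, List.map_map, List.sum_cons]
      have h0 : a * pvP (v :: rest) 1 = a * (v.length : Int) := by simp [pvP]
      rw [h0]
      have : ((List.range rest.length).map
          (fun k => pvRow xf (pvComb n (i + 1 + k + 1)) (a * (v.length : Int) * pvP rest (k + 1)))) =
          ((List.range rest.length).map
          ((fun k => pvRow xf (pvComb n (i + k + 1)) (a * pvP (v :: rest) (k + 1))) ∘ Nat.succ)) := by
        apply List.map_congr_left
        intro k _
        simp only [Function.comp, Nat.succ_eq_add_one, pvP_cons_succ]
        have e1 : i + 1 + k + 1 = i + (k + 1) + 1 := by omega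
        rw [e1, ← mul_assoc]
      rw [this]
      unfold pvRow
      ring

theorem alt_eq (T X : List (String × List Int)) :
    calculate_discrimination_space_alt T X =
      ((List.range T.length).map (fun k =>
        ((List.range X.length).map (fun j =>
          pvComb T.length (k + 1) * pvComb X.length (j + 1) *
            pvComb (pvP (T.map (fun p => p.2)) (k + 1) * pvP (X.map (fun p => p.2)) (j + 1)).toNat 2)).sum)).sum := by
  unfold calculate_discrimination_space_alt
  rw [pvOuter_eq, pvXFacts_eq]
  simp only [zero_add, List.length_map]
  apply congrArg
  apply List.map_congr_left
  intro k _
  unfold pvRow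
  rw [List.map_map]
  apply congrArg
  apply List.map_congr_left
  intro j _
  simp only [Function.comp]
  ring_nf

theorem pyfold_add (n : Nat) (h : Int → Int) (total : Int) :
    (PySem.List.pyRange 1 ((n : Int) + 1) 1).foldl (fun acc j => acc + h j) total
      = total + ((List.range n).map (fun j : Nat => h (1 + (j : Int)))).sum := by
  rw [PySem.List.pyRange_one]
  have e : ((n : Int) + 1 - 1).toNat = n := by omega
  rw [e]
  simp only [List.foldl_map]
  rw [PySem.List.foldl_add]

theorem a_inner (X : List (String × List Int)) (nt ct : Int) (total : Int) :
    (PySem.List.pyRange 1 ((X.length : Int) + 1) 1).foldl (fun total j =>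
        total + ct * pvComb X.length j.toNat *
          pvComb (nt * ((PySem.List.slice (X.map (fun p => p.2)) none (some j)).map
            (fun s => (s.length : Int))).prod).toNat 2) total
      = total + ((List.range X.length).map (fun j =>
          ct * pvComb X.length (j + 1) *
            pvComb (nt * pvP (X.map (fun p => p.2)) (j + 1)).toNat 2)).sum := by
  rw [pyfold_add]
  apply congrArg
  apply congrArg
  apply List.map_congr_left
  intro j _
  have ej : (1 : Int) + (j : Int) = ((j + 1 : Nat) : Int) := by push_cast; ring
  rw [ej, PySem.List.slice_to_natCast, Int.toNat_natCast]
  rfl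

theorem a_eq (T X : List (String × List Int)) :
    calculate_discrimination_space T X =
      ((List.range T.length).map (fun k =>
        ((List.range X.length).map (fun j =>
          pvComb T.length (k + 1) * pvComb X.length (j + 1) *
            pvComb (pvP (T.map (fun p => p.2)) (k + 1) * pvP (X.map (fun p => p.2)) (j + 1)).toNat 2)).sum)).sum := by
  unfold calculate_discrimination_space
  simp only [a_inner]
  rw [pyfold_add, zero_add]
  apply congrArg
  apply List.map_congr_left
  intro k _
  apply congrArg
  apply List.map_congr_left
  intro j _
  have ei : (1 : Int) + (k : Int) = ((k + 1 : Nat) : Int) := by push_cast; ring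
  rw [ei, PySem.List.slice_to_natCast, Int.toNat_natCast]
  rfl

-- ===== VERDICT (by name: the statement is the Claim_ definition above) =====
theorem calculate_discrimination_space_spec : Claim_equal_calculate_discrimination_space := by
  intro T X _
  unfold Spec_calculate_discrimination_space
  rw [a_eq, alt_eq]
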